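-- pv_equiv track=rewrite | github.com/mikkelkrogsholm/maskemania | skills/hækling/croclib/constructions/c2c_blanket.py | c2c_blocks_per_row
-- ===== SOURCE A (Python) =====
-- def c2c_blocks_per_row(width: int, height: int) -> list[int]:
--     """Number of blocks worked in each diagonal row, in order.
--
--     For ``W × H`` (assume W >= H without loss of generality):
--
--     * Increase phase (rows 1..H): row N has N blocks.
--     * Plateau phase (rows H+1..W): row has H blocks (diagonal length).
--     * Decrease phase (rows W+1..W+H-1): row has W+H-N blocks.
--
--     Total rows = ``W + H - 1``.
--     """
--     if width < 1 or height < 1: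
--         raise ValueError(f"width and height must be >= 1 (got {width}, {height})")
--     short, long_ = sorted((width, height))
--     rows: list[int] = []
--     # Increase: 1..short
--     for n in range(1, short + 1):
--         rows.append(n)
--     # Plateau: while the diagonal slides across the long side
--     for _ in range(long_ - short):
--         rows.append(short)
--     # Decrease: short-1..1
--     for n in range(short - 1, 0, -1):
--         rows.append(n)
--     assert len(rows) == width + height - 1
--     return rows
-- ===== SOURCE B (Python) =====
-- def c2c_blocks_per_row(width: int, height: int) -> list[int]:
--     if width < 1 or height < 1:
--         raise ValueError(f"width and height must be >= 1 (got {width}, {height})")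
--     short = min(width, height)
--     return [min(k, short, width + height - k) for k in range(1, width + height)]
-- ===== Notes on version B (the rewrite author's own statement) =====
-- stated objective: simpler
-- what changed: Replaces the three phase-loops (increase, plateau, decrease) by a single comprehension computing each diagonal's block count with the closed form min(k, min(width,height), width+height-k).
import Mathlib
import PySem

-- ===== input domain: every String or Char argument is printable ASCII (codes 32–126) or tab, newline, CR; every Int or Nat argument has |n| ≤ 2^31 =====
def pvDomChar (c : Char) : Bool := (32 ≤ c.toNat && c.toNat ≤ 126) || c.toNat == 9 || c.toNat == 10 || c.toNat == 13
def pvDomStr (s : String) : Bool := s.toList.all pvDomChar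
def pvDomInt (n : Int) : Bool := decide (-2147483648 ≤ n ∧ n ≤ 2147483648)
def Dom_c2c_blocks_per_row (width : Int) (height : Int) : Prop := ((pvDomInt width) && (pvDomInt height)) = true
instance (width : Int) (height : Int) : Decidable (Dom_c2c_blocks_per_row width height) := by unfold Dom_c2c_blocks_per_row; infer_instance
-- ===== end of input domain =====

-- B replaces A's three phase-loops by a single per-diagonal closed form; objective: simpler.
-- ===== PORT A =====
def c2c_blocks_per_row (width : Int) (height : Int) : List Int :=
  -- width < 1 or height < 1 raises ValueError: excluded by Pre_
  let p := if width ≤ height then (width, height) else (height, width)  -- sorted((width, height))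
  let short := p.1
  let long_ := p.2
  let rows : List Int := []
  let rows := (PySem.List.pyRange 1 (short + 1) 1).foldl (fun acc n => acc ++ [n]) rows
  let rows := (PySem.List.pyRange 0 (long_ - short) 1).foldl (fun acc _ => acc ++ [short]) rows
  let rows := (PySem.List.pyRange (short - 1) 0 (-1)).foldl (fun acc n => acc ++ [n]) rows
  rows

-- ===== PORT B =====
def c2c_blocks_per_row_alt (width : Int) (height : Int) : List Int :=
  let short := min width height
  (PySem.List.pyRange 1 (width + height) 1).map (fun k => min (min k short) (width + height - k))

-- ===== PRECONDITION & SPEC =====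
-- Pre_ excludes exactly the inputs on which A raises ValueError (width < 1 or height < 1).
def Pre_c2c_blocks_per_row (width : Int) (height : Int) : Prop := 1 ≤ width ∧ 1 ≤ height
instance (width : Int) (height : Int) : Decidable (Pre_c2c_blocks_per_row width height) := by unfold Pre_c2c_blocks_per_row; infer_instance
def pvWitness_c2c_blocks_per_row : Int × Int := (4, 3)
def Spec_c2c_blocks_per_row (width : Int) (height : Int) (out : List Int) : Prop := out = c2c_blocks_per_row_alt width height
instance (width : Int) (height : Int) (out : List Int) : Decidable (Spec_c2c_blocks_per_row width height out) := by unfold Spec_c2c_blocks_per_row; infer_instance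

-- ===== CLAIM (what is proved, stated in full; the proofs are below) =====
def Claim_equal_c2c_blocks_per_row : Prop := ∀ (width : Int) (height : Int), Dom_c2c_blocks_per_row width height → Pre_c2c_blocks_per_row width height → Spec_c2c_blocks_per_row width height (c2c_blocks_per_row width height)

-- ===== LEMMAS AND PROOFS =====

-- Core identity: for 1 ≤ s ≤ l, A's three concatenated phases equal B's per-diagonal formula.
lemma c2c_phases_eq_formula (s l : Int) (hs : 1 ≤ s) (hsl : s ≤ l) :
    PySem.List.pyRange 1 (s + 1) 1
      ++ (PySem.List.pyRange 0 (l - s) 1).map (fun _ => s)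
      ++ PySem.List.pyRange (s - 1) 0 (-1)
    = (PySem.List.pyRange 1 (s + l) 1).map (fun k => min (min k s) (s + l - k)) := by
  rw [PySem.List.pyRange_one 1 (s+1), PySem.List.pyRange_one 0 (l-s),
      PySem.List.pyRange_neg_one (s-1) 0, PySem.List.pyRange_one 1 (s+l)]
  apply List.ext_getElem
  · simp [List.length_append]; omega
  · intro i h1 h2
    simp only [List.length_append, List.length_map, List.length_range] at h1 h2
    simp only [List.getElem_append, List.getElem_map, List.getElem_range, List.length_append,
      List.length_map, List.length_range]
    split_ifs with ha hb <;>
      · simp only [min_def]; split_ifs <;> omega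

-- ===== VERDICT =====
theorem c2c_blocks_per_row_spec : Claim_equal_c2c_blocks_per_row := by
  intro width height _ hpre
  obtain ⟨hw, hh⟩ := hpre
  unfold Spec_c2c_blocks_per_row c2c_blocks_per_row c2c_blocks_per_row_alt
  simp only [PySem.List.foldl_append_singleton_eq_self, PySem.List.foldl_append_singleton_eq_map,
    List.nil_append]
  rcases le_or_gt width height with hle | hlt
  · simp only [if_pos hle]
    rw [min_eq_left hle]
    exact c2c_phases_eq_formula width height hw hle
  · simp only [if_neg (not_le_of_gt hlt)]
    rw [min_eq_right (le_of_lt hlt), show width + height = height + width by ring]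
    exact c2c_phases_eq_formula height width hh hlt.le
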